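-- pv_equiv track=rewrite | github.com/mwisnowski/mtg_python_deckbuilder | code/deck_builder/brackets_compliance.py | _collect_tag_counts
-- ===== SOURCE A (Python) =====
-- from typing import Dict, List, Optional, Tuple
--
-- POLICY_TAGS = {
--     "game_changers": "Bracket:GameChanger",
--     "extra_turns": "Bracket:ExtraTurn",
--     "mass_land_denial": "Bracket:MassLandDenial",
--     "tutors_nonland": "Bracket:TutorNonland",
-- }
--
-- def _collect_tag_counts(card_library: Dict[str, Dict]) -> Tuple[Dict[str, int], Dict[str, List[str]]]:
--     counts: Dict[str, int] = {v: 0 for v in POLICY_TAGS.values()}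
--     flagged_names: Dict[str, List[str]] = {k: [] for k in POLICY_TAGS.keys()}
--     for name, info in (card_library or {}).items():
--         tags = [t for t in (info.get("Tags") or []) if isinstance(t, str)]
--         for key, tag in POLICY_TAGS.items():
--             if tag in tags:
--                 counts[tag] += 1
--                 flagged_names[key].append(name)
--     return counts, flagged_names
-- ===== SOURCE B (Python) =====
-- from typing import Dict, List, Tuple
--
-- POLICY_TAGS = {
--     "game_changers": "Bracket:GameChanger",
--     "extra_turns": "Bracket:ExtraTurn",
--     "mass_land_denial": "Bracket:MassLandDenial",
--     "tutors_nonland": "Bracket:TutorNonland",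
-- }
--
-- def _collect_tag_counts(card_library: Dict[str, Dict]) -> Tuple[Dict[str, int], Dict[str, List[str]]]:
--     items = list((card_library or {}).items())
--
--     def hit(info, tag):
--         return tag in (info.get("Tags") or [])
--
--     counts = {tag: sum(1 for _, info in items if hit(info, tag)) for tag in POLICY_TAGS.values()}
--     flagged = {key: [name for name, info in items if hit(info, tag)] for key, tag in POLICY_TAGS.items()}
--     return counts, flagged
-- ===== Notes on version B (the rewrite author's own statement) =====
-- stated objective: alternative
-- what changed: B transposes the traversal: instead of one pass over cards with nested scans of the four policy tags updating mutable dicts, it builds each result entry directly per policy tag with a count/filter comprehension over the card list.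
import Mathlib
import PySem

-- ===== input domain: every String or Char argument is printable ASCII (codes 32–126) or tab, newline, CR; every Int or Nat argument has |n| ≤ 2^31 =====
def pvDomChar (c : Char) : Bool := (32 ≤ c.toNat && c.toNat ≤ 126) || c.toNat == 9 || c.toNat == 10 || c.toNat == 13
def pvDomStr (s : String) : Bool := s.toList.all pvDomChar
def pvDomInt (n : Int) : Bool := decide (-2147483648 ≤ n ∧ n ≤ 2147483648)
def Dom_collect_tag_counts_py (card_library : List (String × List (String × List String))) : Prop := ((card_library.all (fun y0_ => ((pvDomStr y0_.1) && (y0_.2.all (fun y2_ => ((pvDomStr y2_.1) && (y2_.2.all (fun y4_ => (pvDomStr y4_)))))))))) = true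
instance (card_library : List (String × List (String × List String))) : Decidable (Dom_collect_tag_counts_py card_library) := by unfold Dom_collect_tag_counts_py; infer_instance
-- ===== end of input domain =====

-- B builds each counts/flagged entry directly per policy tag via count/filter over the card list,
-- instead of A's single pass over cards with nested per-tag scans updating mutable dicts. (alternative)


-- ===== PORT A =====
def policyTags : List (String × String) :=
  [("game_changers", "Bracket:GameChanger"),
   ("extra_turns", "Bracket:ExtraTurn"),
   ("mass_land_denial", "Bracket:MassLandDenial"),
   ("tutors_nonland", "Bracket:TutorNonland")]

-- info.get("Tags") or []   (under the type convention all tags are strings, so the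
-- 'isinstance(t, str)' filter keeps every element and is ported as the list itself)
def cardTags (info : List (String × List String)) : List String :=
  ((PySem.Dict.mk info).get? "Tags").getD []

def collect_tag_counts_py (card_library : List (String × List (String × List String))) : (List (String × Int)) × (List (String × List String)) :=
  let counts0 : PySem.Dict String Int := PySem.Dict.ofList (policyTags.map (fun kv => (kv.2, 0)))
  let flagged0 : PySem.Dict String (List String) := PySem.Dict.ofList (policyTags.map (fun kv => (kv.1, [])))
  let st := card_library.foldl (fun (st : PySem.Dict String Int × PySem.Dict String (List String)) c =>
      let tags := cardTags c.2
      policyTags.foldl (fun st2 kv =>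
        if tags.contains kv.2 then
          (st2.1.modify kv.2 0 (· + 1), st2.2.modify kv.1 [] (· ++ [c.1]))
        else st2) st)
    (counts0, flagged0)
  (st.1.items, st.2.items)

-- ===== PORT B =====
def hitB (info : List (String × List String)) (tag : String) : Bool :=
  (((PySem.Dict.mk info).get? "Tags").getD []).contains tag

def collect_tag_counts_py_alt (card_library : List (String × List (String × List String))) : (List (String × Int)) × (List (String × List String)) :=
  (policyTags.map (fun kv => (kv.2, (card_library.countP (fun c => hitB c.2 kv.2) : Int))),
   policyTags.map (fun kv => (kv.1, (card_library.filter (fun c => hitB c.2 kv.2)).map (·.1))))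

-- ===== PRECONDITION & SPEC =====
def Spec_collect_tag_counts_py (card_library : List (String × List (String × List String))) (out : (List (String × Int)) × (List (String × List String))) : Prop := out = collect_tag_counts_py_alt card_library
instance (card_library : List (String × List (String × List String))) (out : (List (String × Int)) × (List (String × List String))) : Decidable (Spec_collect_tag_counts_py card_library out) := by unfold Spec_collect_tag_counts_py; infer_instance

-- ===== CLAIM (what is proved, stated in full; the proofs are below) =====
def Claim_equal_collect_tag_counts_py : Prop := ∀ (card_library : List (String × List (String × List String))), Dom_collect_tag_counts_py card_library → Spec_collect_tag_counts_py card_library (collect_tag_counts_py card_library)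

-- ===== LEMMAS AND PROOFS =====


-- One card's step of A's fold on the concrete four-key state.
theorem stepA_eq (x : String × List (String × List String))
    (c1 c2 c3 c4 : Int) (l1 l2 l3 l4 : List String) :
    (policyTags.foldl (fun (st2 : PySem.Dict String Int × PySem.Dict String (List String)) kv =>
        if (cardTags x.2).contains kv.2 then
          (st2.1.modify kv.2 0 (· + 1), st2.2.modify kv.1 [] (· ++ [x.1]))
        else st2)
      (PySem.Dict.mk [("Bracket:GameChanger", c1), ("Bracket:ExtraTurn", c2),
                      ("Bracket:MassLandDenial", c3), ("Bracket:TutorNonland", c4)],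
       PySem.Dict.mk [("game_changers", l1), ("extra_turns", l2),
                      ("mass_land_denial", l3), ("tutors_nonland", l4)])) =
    (PySem.Dict.mk [("Bracket:GameChanger", c1 + if hitB x.2 "Bracket:GameChanger" then 1 else 0),
                    ("Bracket:ExtraTurn", c2 + if hitB x.2 "Bracket:ExtraTurn" then 1 else 0),
                    ("Bracket:MassLandDenial", c3 + if hitB x.2 "Bracket:MassLandDenial" then 1 else 0),
                    ("Bracket:TutorNonland", c4 + if hitB x.2 "Bracket:TutorNonland" then 1 else 0)],
     PySem.Dict.mk [("game_changers", l1 ++ if hitB x.2 "Bracket:GameChanger" then [x.1] else []),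
                    ("extra_turns", l2 ++ if hitB x.2 "Bracket:ExtraTurn" then [x.1] else []),
                    ("mass_land_denial", l3 ++ if hitB x.2 "Bracket:MassLandDenial" then [x.1] else []),
                    ("tutors_nonland", l4 ++ if hitB x.2 "Bracket:TutorNonland" then [x.1] else [])]) := by
  have hb : ∀ t, hitB x.2 t = (cardTags x.2).contains t := fun t => rfl
  by_cases h1 : "Bracket:GameChanger" ∈ cardTags x.2 <;>
  by_cases h2 : "Bracket:ExtraTurn" ∈ cardTags x.2 <;>
  by_cases h3 : "Bracket:MassLandDenial" ∈ cardTags x.2 <;>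
  by_cases h4 : "Bracket:TutorNonland" ∈ cardTags x.2 <;>
  simp [policyTags, hb, h1, h2, h3, h4,
    PySem.Dict.modify, PySem.Dict.insert, PySem.Dict.getD, PySem.Dict.get?, PySem.Dict.contains]

-- Invariant of A's fold: the two dicts always hold exactly the four fixed keys, and the
-- fold over the remaining cards adds the per-tag count / appends the per-tag names.
theorem foldA_inv (cl : List (String × List (String × List String)))
    (c1 c2 c3 c4 : Int) (l1 l2 l3 l4 : List String) :
    cl.foldl (fun (st : PySem.Dict String Int × PySem.Dict String (List String)) c =>
      let tags := cardTags c.2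
      policyTags.foldl (fun st2 kv =>
        if tags.contains kv.2 then
          (st2.1.modify kv.2 0 (· + 1), st2.2.modify kv.1 [] (· ++ [c.1]))
        else st2) st)
      (PySem.Dict.mk [("Bracket:GameChanger", c1), ("Bracket:ExtraTurn", c2),
                      ("Bracket:MassLandDenial", c3), ("Bracket:TutorNonland", c4)],
       PySem.Dict.mk [("game_changers", l1), ("extra_turns", l2),
                      ("mass_land_denial", l3), ("tutors_nonland", l4)]) =
    (PySem.Dict.mk [("Bracket:GameChanger", c1 + cl.countP (fun c => hitB c.2 "Bracket:GameChanger")),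
                    ("Bracket:ExtraTurn", c2 + cl.countP (fun c => hitB c.2 "Bracket:ExtraTurn")),
                    ("Bracket:MassLandDenial", c3 + cl.countP (fun c => hitB c.2 "Bracket:MassLandDenial")),
                    ("Bracket:TutorNonland", c4 + cl.countP (fun c => hitB c.2 "Bracket:TutorNonland"))],
     PySem.Dict.mk [("game_changers", l1 ++ (cl.filter (fun c => hitB c.2 "Bracket:GameChanger")).map (·.1)),
                    ("extra_turns", l2 ++ (cl.filter (fun c => hitB c.2 "Bracket:ExtraTurn")).map (·.1)),
                    ("mass_land_denial", l3 ++ (cl.filter (fun c => hitB c.2 "Bracket:MassLandDenial")).map (·.1)),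
                    ("tutors_nonland", l4 ++ (cl.filter (fun c => hitB c.2 "Bracket:TutorNonland")).map (·.1))]) := by
  induction cl generalizing c1 c2 c3 c4 l1 l2 l3 l4 with
  | nil => simp
  | cons x xs ih =>
    rw [List.foldl_cons]
    show List.foldl _ (policyTags.foldl _ _) xs = _
    rw [stepA_eq, ih]
    by_cases h1 : hitB x.2 "Bracket:GameChanger" <;>
    by_cases h2 : hitB x.2 "Bracket:ExtraTurn" <;>
    by_cases h3 : hitB x.2 "Bracket:MassLandDenial" <;>
    by_cases h4 : hitB x.2 "Bracket:TutorNonland" <;>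
    simp [h1, h2, h3, h4, List.append_assoc] <;>
    omega

-- ===== VERDICT (by name: the statement is the Claim_ definition above) =====
theorem collect_tag_counts_py_spec : Claim_equal_collect_tag_counts_py := by
  intro cl _
  show collect_tag_counts_py cl = collect_tag_counts_py_alt cl
  simp only [collect_tag_counts_py, collect_tag_counts_py_alt]
  rw [show PySem.Dict.ofList (policyTags.map (fun kv => (kv.2, (0 : Int)))) =
        PySem.Dict.mk [("Bracket:GameChanger", 0), ("Bracket:ExtraTurn", 0),
                       ("Bracket:MassLandDenial", 0), ("Bracket:TutorNonland", 0)] from rfl,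
      show PySem.Dict.ofList (policyTags.map (fun kv => (kv.1, ([] : List String)))) =
        PySem.Dict.mk [("game_changers", []), ("extra_turns", []),
                       ("mass_land_denial", []), ("tutors_nonland", [])] from rfl,
      foldA_inv]
  simp [policyTags]
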